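-- pv_equiv track=rewrite | github.com/PyroGenesis/Codiq | LeetCode/331-Verify-Preorder-Serialization-of-a-Binary-Tree.py | isValidSerializationInitial
-- ===== SOURCE A (Python) =====
-- def isValidSerializationInitial(preorder: str) -> bool:
--     # initially we have one empty slot to put the root in it
--     slots = 1
--     for node in preorder.split(','):
--         # no empty slot to put the current node
--         if slots == 0:
--             return False
--
--         if node == '#':
--             # null node uses up a slot
--             slots -= 1
--         else:
--             # number node creates a new slot
--             slots += 1
--
--     # we don't allow empty slots at the end
--     return slots == 0
-- ===== SOURCE B (Python) =====
-- def isValidSerializationInitial(preorder: str) -> bool: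
--     # Explicit-stack reduction: push each token; whenever the top three are
--     # [number, '#', '#'], a complete subtree has been read, so collapse it
--     # into a single '#'.  A fully reduced tree is exactly the stack ['#'];
--     # a further token arriving then has no place to go, so we reject.
--     stack = []
--     for node in preorder.split(','):
--         if stack == ['#']:
--             # the serialized tree is already complete; nothing can follow
--             return False
--         stack.append(node)
--         while len(stack) >= 3 and stack[-1] == '#' and stack[-2] == '#' and stack[-3] != '#':
--             del stack[-3:]
--             stack.append('#')
--     return stack == ['#']
-- ===== Notes on version B (the rewrite author's own statement) =====
-- stated objective: alternative
-- what changed: Replaces the open-slot counter with an explicit token stack that collapses each completed [number,'#','#'] subtree into a single '#', accepting iff the stack reduces to exactly ['#'].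
import Mathlib
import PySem

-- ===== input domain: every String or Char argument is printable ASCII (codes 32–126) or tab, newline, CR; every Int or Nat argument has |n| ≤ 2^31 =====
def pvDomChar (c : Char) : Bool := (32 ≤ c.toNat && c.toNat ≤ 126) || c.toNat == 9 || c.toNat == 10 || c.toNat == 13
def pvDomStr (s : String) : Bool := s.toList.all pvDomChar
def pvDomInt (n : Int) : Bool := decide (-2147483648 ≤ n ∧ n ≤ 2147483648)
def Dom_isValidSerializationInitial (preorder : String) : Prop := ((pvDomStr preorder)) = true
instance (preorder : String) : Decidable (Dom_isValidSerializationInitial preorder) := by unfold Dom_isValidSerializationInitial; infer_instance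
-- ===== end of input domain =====

-- B replaces A's open-slot counter by an explicit token stack that collapses completed
-- [number,'#','#'] subtrees into '#' (objective: alternative, same linear cost).

-- ===== PORT A =====
-- A's for-loop over the tokens, with its early return on slots == 0.
def pyAList : List String → Int → Bool
  | [], slots => slots == 0
  | node :: rest, slots =>
    if slots == 0 then false
    else if node == "#" then pyAList rest (slots - 1)
    else pyAList rest (slots + 1)

def isValidSerializationInitial (preorder : String) : Bool :=
  pyAList ((PySem.Str.split? preorder ",").getD []) 1  -- sep "," ≠ "", so split? is `some`

-- ===== PORT B =====
-- B's inner while-loop; the stack is kept top-at-head (Python appends at the end).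
def pyCollapse : List String → List String
  | a :: b :: c :: rest =>
    if a == "#" && b == "#" && c != "#" then pyCollapse ("#" :: rest)
    else a :: b :: c :: rest
  | s => s
termination_by l => l.length
decreasing_by simp

-- B's for-loop over the tokens: guard, push, collapse.
def pyBList : List String → List String → Bool
  | [], stack => stack == ["#"]
  | node :: rest, stack =>
    if stack == ["#"] then false
    else pyBList rest (pyCollapse (node :: stack))

def isValidSerializationInitial_alt (preorder : String) : Bool :=
  pyBList ((PySem.Str.split? preorder ",").getD []) []

-- ===== PRECONDITION & SPEC =====
def Spec_isValidSerializationInitial (preorder : String) (out : Bool) : Prop := out = isValidSerializationInitial_alt preorder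
instance (preorder : String) (out : Bool) : Decidable (Spec_isValidSerializationInitial preorder out) := by unfold Spec_isValidSerializationInitial; infer_instance

-- ===== CLAIM (what is proved, stated in full; the proofs are below) =====
def Claim_equal_isValidSerializationInitial : Prop := ∀ (preorder : String), Dom_isValidSerializationInitial preorder → Spec_isValidSerializationInitial preorder (isValidSerializationInitial preorder)

-- ===== LEMMAS AND PROOFS =====

-- `gSlots stack` is A's slot count for the token prefix the stack represents
-- (stack is top-at-head, so the bottom-up prefix sums are sums over tails).
def gSlots : List String → Int
  | [] => 1
  | x :: r => gSlots r + (if x = "#" then -1 else 1)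

-- every strict tail (= strict bottom-up prefix of the stack) has at least one open slot
def AllSuf : List String → Prop
  | [] => True
  | _ :: r => gSlots r ≥ 1 ∧ AllSuf r

-- no two adjacent '#' entries (the collapse loop is eager)
def NoHH : List String → Prop
  | a :: b :: r => ¬(a = "#" ∧ b = "#") ∧ NoHH (b :: r)
  | _ => True

def StkInv (stack : List String) (s : Int) : Prop :=
  gSlots stack = s ∧ AllSuf stack ∧ NoHH stack

lemma stkInv_pos {stack : List String} {s : Int} (h : StkInv stack s) (hs : s ≠ 0) : 1 ≤ s := by
  obtain ⟨hg, ha, -⟩ := h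
  cases stack with
  | nil => simp [gSlots] at hg; omega
  | cons x r =>
    obtain ⟨hr, -⟩ := ha
    simp [gSlots] at hg
    split_ifs at hg <;> omega

lemma stkInv_zero_iff {stack : List String} {s : Int} (h : StkInv stack s) :
    s = 0 ↔ stack = ["#"] := by
  obtain ⟨hg, ha, hn⟩ := h
  constructor
  · intro hs
    subst hs
    match stack, hg, ha, hn with
    | [], hg, _, _ => simp [gSlots] at hg
    | [x], hg, _, _ =>
      simp [gSlots] at hg
      split_ifs at hg with hx
      · subst hx; rfl
      · omega
    | x :: y :: r, hg, ⟨h1, h2, h3⟩, ⟨hp, _⟩ =>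
      simp [gSlots] at hg h1
      split_ifs at hg h1 with hx hy hy <;> simp_all
      omega
  · intro hs; subst hs; simp [gSlots] at hg; omega

lemma collapse_nonhash (a : String) (v : List String) (ha : a ≠ "#") :
    pyCollapse (a :: v) = a :: v := by
  match v with
  | [] => rw [pyCollapse.eq_def]
  | [b] => rw [pyCollapse.eq_def]
  | b :: c :: r =>
    rw [pyCollapse.eq_def]
    simp [ha]

lemma collapse_inv_aux : ∀ (n : Nat) (w : List String), w.length ≤ n →
    NoHH w → gSlots w ≥ 1 → AllSuf w →
    StkInv (pyCollapse ("#" :: w)) (gSlots ("#" :: w)) := by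
  intro n
  induction n with
  | zero =>
    intro w hlen _ hg _
    have : w = [] := by cases w <;> simp_all
    subst this
    have h1 : pyCollapse ["#"] = ["#"] := by rw [pyCollapse.eq_def]
    rw [h1]
    exact ⟨rfl, ⟨by simp [gSlots], trivial⟩, trivial⟩
  | succ n ih =>
    intro w hlen hn hg ha
    match w with
    | [] =>
      have h1 : pyCollapse ["#"] = ["#"] := by rw [pyCollapse.eq_def]
      rw [h1]
      exact ⟨rfl, ⟨by simp [gSlots], trivial⟩, trivial⟩
    | [y] =>
      have hy : y ≠ "#" := by
        intro hy; subst hy; simp [gSlots] at hg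
      have h1 : pyCollapse ["#", y] = ["#", y] := by rw [pyCollapse.eq_def]
      rw [h1]
      refine ⟨rfl, ?_, ?_⟩
      · exact ⟨hg, by simp [gSlots], trivial⟩
      · exact ⟨fun hc => hy hc.2, trivial⟩
    | y :: z :: r =>
      obtain ⟨hyz, hzr⟩ := hn
      obtain ⟨hgz, hgr, har⟩ := ha
      by_cases hy : y = "#"
      · subst hy
        have hz : z ≠ "#" := fun hc => hyz ⟨rfl, hc⟩
        have h1 : pyCollapse ("#" :: "#" :: z :: r) = pyCollapse ("#" :: r) := by
          rw [pyCollapse.eq_def]; simp [hz]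
        rw [h1]
        have hnr : NoHH r := by
          cases r with
          | nil => trivial
          | cons a t => exact hzr.2
        have hrec := ih r (by simp at hlen ⊢; omega) hnr hgr har
        have hgeq : gSlots ("#" :: r) = gSlots ("#" :: "#" :: z :: r) := by
          simp [gSlots, hz]
        rwa [hgeq] at hrec
      · have h1 : pyCollapse ("#" :: y :: z :: r) = "#" :: y :: z :: r := by
          rw [pyCollapse.eq_def]; simp [hy]
        rw [h1]
        refine ⟨rfl, ⟨hg, hgz, hgr, har⟩, ?_⟩
        exact ⟨fun hc => hy hc.2, hyz, hzr⟩

lemma collapse_inv (w : List String) (hn : NoHH w) (hg : gSlots w ≥ 1) (ha : AllSuf w) :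
    StkInv (pyCollapse ("#" :: w)) (gSlots ("#" :: w)) :=
  collapse_inv_aux w.length w le_rfl hn hg ha

-- main simulation: with the invariant, A's counter loop and B's stack loop agree
lemma loops_agree : ∀ (toks stack : List String) (s : Int), StkInv stack s →
    pyAList toks s = pyBList toks stack := by
  intro toks
  induction toks with
  | nil =>
    intro stack s hInv
    simp only [pyAList, pyBList]
    have h := stkInv_zero_iff hInv
    by_cases hs : s = 0
    · simp [hs, h.mp hs]
    · have : stack ≠ ["#"] := fun hc => hs (h.mpr hc)
      simp [hs, this]
  | cons node rest ih =>
    intro stack s hInv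
    simp only [pyAList, pyBList]
    have h := stkInv_zero_iff hInv
    by_cases hs : s = 0
    · simp [hs, h.mp hs]
    · have hne : stack ≠ ["#"] := fun hc => hs (h.mpr hc)
      have hpos : 1 ≤ s := stkInv_pos hInv hs
      obtain ⟨hg, ha, hn⟩ := hInv
      have hsb : ¬((s == 0) = true) := by simpa using hs
      have hneb : ¬((stack == ["#"]) = true) := by simpa using hne
      rw [if_neg hsb, if_neg hneb]
      by_cases hnode : node = "#"
      · subst hnode
        rw [if_pos (show (("#" : String) == "#") = true by simp)]
        have hc := collapse_inv stack hn (by omega) ha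
        have hgeq : gSlots ("#" :: stack) = s - 1 := by simp [gSlots, hg]; ring
        rw [hgeq] at hc
        exact ih _ _ hc
      · have hnodeb : ¬((node == "#") = true) := by simpa using hnode
        rw [if_neg hnodeb]
        rw [collapse_nonhash node stack hnode]
        apply ih
        refine ⟨by simp [gSlots, hg, hnode], ⟨by omega, ha⟩, ?_⟩
        cases stack with
        | nil => trivial
        | cons x r => exact ⟨fun hc => hnode hc.1, hn⟩

-- ===== VERDICT (by name: the statement is the Claim_ definition above) =====
theorem isValidSerializationInitial_spec : Claim_equal_isValidSerializationInitial := by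
  intro preorder _
  unfold Spec_isValidSerializationInitial isValidSerializationInitial isValidSerializationInitial_alt
  exact loops_agree _ [] 1 ⟨rfl, trivial, trivial⟩
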